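-- pv_equiv track=rewrite | github.com/Shinbey73/Ringtone-interpreter | ringtone_interpreter.py | check_valid_note
-- ===== SOURCE A (Python) =====
-- def check_valid_note(note_data):
--         # Valid note lengths, pitches, and scales
--         valid_lengths = {'1', '2', '4', '8', '16', '32', ''}
--         valid_pitches = {'a', 'b', 'c', 'd', 'e', 'f', 'g', 'p', 'a#', 'b#', 'c#', 'd#', 'e#', 'f#', 'g#'}
--         valid_scales = {'1', '2', '3', '4', '5', '6', '7', '8', ''}
--         full_stop = {'.', ''}
--
--         delimiter1 = ','
--         list= []
--
--         formatted_note_data = note_data.replace(' ', '').lower()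
--         note_val = formatted_note_data.split(delimiter1)
--
--         for length in valid_lengths:
--             for pitch in valid_pitches:
--                 for scale in valid_scales:
--                     for stop in full_stop:
--                         Note = f"{length}{pitch}{scale}{stop}"
--                         list.append(Note)
--
--         valid_note = ''
--         valid = True
--         for notes in (note_val):
--             if notes not in list:
--                 valid = False
--                 break
--         return valid
-- ===== SOURCE B (Python) =====
-- def check_valid_note(note_data):
--     s = note_data.replace(' ', '').lower()
--     for note in s.split(','):
--         i = 0
--         while i < len(note) and note[i].isdigit():
--             i += 1
--         digits, rest = note[:i], note[i:]
--         if digits not in ('', '1', '2', '4', '8', '16', '32'):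
--             return False
--         if not rest or rest[0] not in 'abcdefgp':
--             return False
--         pitch, rest = rest[0], rest[1:]
--         if rest and rest[0] == '#':
--             if pitch == 'p':
--                 return False
--             rest = rest[1:]
--         if rest and rest[0] in '12345678':
--             rest = rest[1:]
--         if rest and rest[0] == '.':
--             rest = rest[1:]
--         if rest:
--             return False
--     return True
-- ===== Notes on version B (the rewrite author's own statement) =====
-- stated objective: simpler
-- what changed: B drops A's precomputed cartesian-product table of all 1890 valid note strings and instead parses each note positionally (leading length digits, one pitch letter, optional '#' except after 'p', optional scale digit 1-8, optional trailing '.'), accepting exactly the same notes.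
import Mathlib
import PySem

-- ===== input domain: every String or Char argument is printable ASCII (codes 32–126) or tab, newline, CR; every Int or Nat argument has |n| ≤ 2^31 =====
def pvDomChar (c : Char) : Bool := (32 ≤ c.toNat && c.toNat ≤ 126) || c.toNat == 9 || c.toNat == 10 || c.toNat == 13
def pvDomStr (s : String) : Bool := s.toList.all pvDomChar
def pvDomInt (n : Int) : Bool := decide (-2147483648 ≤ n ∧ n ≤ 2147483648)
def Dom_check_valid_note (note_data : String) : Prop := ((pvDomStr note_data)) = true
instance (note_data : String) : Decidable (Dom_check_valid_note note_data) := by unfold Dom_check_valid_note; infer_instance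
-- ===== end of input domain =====

-- B replaces A's precomputed 1890-string cartesian-product table by a direct positional parse of each note; objective: simpler (no global table), not claimed faster.

-- ===== PORT A =====
def pvLengthsSet : PySem.Set (List Char) :=
  PySem.Set.ofList [['1'], ['2'], ['4'], ['8'], ['1','6'], ['3','2'], []]
def pvPitchesSet : PySem.Set (List Char) :=
  PySem.Set.ofList [['a'],['b'],['c'],['d'],['e'],['f'],['g'],['p'],
    ['a','#'],['b','#'],['c','#'],['d','#'],['e','#'],['f','#'],['g','#']]
def pvScalesSet : PySem.Set (List Char) :=
  PySem.Set.ofList [['1'],['2'],['3'],['4'],['5'],['6'],['7'],['8'],[]]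
def pvStopsSet : PySem.Set (List Char) :=
  PySem.Set.ofList [['.'], []]

-- the quadruple nested loop building `list`
def pvNoteList : List (List Char) :=
  pvLengthsSet.foldl (fun acc len =>
    pvPitchesSet.foldl (fun acc pitch =>
      pvScalesSet.foldl (fun acc scale =>
        pvStopsSet.foldl (fun acc stop => acc ++ [len ++ pitch ++ scale ++ stop]) acc) acc) acc) []

-- the final loop: sets valid=False and breaks on the first note not in `list`
def pvCheckLoop : List (List Char) → Bool
  | [] => true
  | n :: rest => if pvNoteList.contains n then pvCheckLoop rest else false

def check_valid_note (note_data : String) : Bool :=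
  let formatted := PySem.Chars.lower (PySem.Chars.replace note_data.toList [' '] [])
  pvCheckLoop (PySem.Chars.splitOn formatted [','])

-- ===== PORT B =====
def pvLenTokens : List (List Char) := [[], ['1'], ['2'], ['4'], ['8'], ['1','6'], ['3','2']]
def pvPitchChars : List Char := ['a','b','c','d','e','f','g','p']
def pvScaleChars : List Char := ['1','2','3','4','5','6','7','8']

-- Source B's leading-digits while loop: split note into (digits, rest)
def pvSpanDigits : List Char → List Char × List Char
  | [] => ([], [])
  | c :: t =>
    if PySem.Chars.isdigit c then
      let (d, r) := pvSpanDigits t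
      (c :: d, r)
    else ([], c :: t)

-- optional trailing '.': rest must then be empty
def pvParseStop : List Char → Bool
  | [] => true
  | c :: t => if c = '.' then t.isEmpty else false

-- optional single scale digit, then the stop step
def pvParseScale : List Char → Bool
  | [] => pvParseStop []
  | c :: t => if pvScaleChars.contains c then pvParseStop t else pvParseStop (c :: t)

def pvParseNote (note : List Char) : Bool :=
  let s := pvSpanDigits note
  if !(pvLenTokens.contains s.1) then false
  else
    match s.2 with
    | [] => false
    | pitch :: r1 =>
      if !(pvPitchChars.contains pitch) then false
      else
        match r1 with
        | [] => pvParseScale r1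
        | c :: r2 =>
          if c = '#' then (if pitch = 'p' then false else pvParseScale r2)
          else pvParseScale r1

def check_valid_note_alt (note_data : String) : Bool :=
  let s := PySem.Chars.lower (PySem.Chars.replace note_data.toList [' '] [])
  (PySem.Chars.splitOn s [',']).all pvParseNote

-- ===== PRECONDITION & SPEC =====
def Spec_check_valid_note (note_data : String) (out : Bool) : Prop := out = check_valid_note_alt note_data
instance (note_data : String) (out : Bool) : Decidable (Spec_check_valid_note note_data out) := by unfold Spec_check_valid_note; infer_instance

-- ===== CLAIM (what is proved, stated in full; the proofs are below) =====
def Claim_equal_check_valid_note : Prop := ∀ (note_data : String), Dom_check_valid_note note_data → Spec_check_valid_note note_data (check_valid_note note_data)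

-- ===== LEMMAS AND PROOFS =====

theorem pvFlattenMapSingleton {α β : Type} (f : α → β) (P : List α) :
    (List.map (fun b => [f b]) P).flatten = List.map f P := by
  induction P with
  | nil => rfl
  | cons a t ih => simp [ih]

-- the table is the flatMap of its four generator lists
theorem pvNoteList_eq : pvNoteList =
    pvLengthsSet.flatMap (fun l => pvPitchesSet.flatMap (fun p =>
      pvScalesSet.flatMap (fun sc => pvStopsSet.map (fun st => l ++ p ++ sc ++ st)))) := by
  simp [pvNoteList, List.flatMap_def, pvFlattenMapSingleton]

theorem mem_pvNoteList_iff (cs : List Char) :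
    cs ∈ pvNoteList ↔ ∃ l ∈ pvLengthsSet, ∃ p ∈ pvPitchesSet, ∃ sc ∈ pvScalesSet,
      ∃ st ∈ pvStopsSet, cs = l ++ p ++ sc ++ st := by
  rw [pvNoteList_eq]
  simp only [List.mem_flatMap, List.mem_map]
  constructor
  · rintro ⟨l, hl, p, hp, sc, hsc, st, hst, rfl⟩
    exact ⟨l, hl, p, hp, sc, hsc, st, hst, rfl⟩
  · rintro ⟨l, hl, p, hp, sc, hsc, st, hst, rfl⟩
    exact ⟨l, hl, p, hp, sc, hsc, st, hst, rfl⟩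

-- small decidable facts about the literal generator sets
theorem pvLen_facts : ∀ l ∈ pvLengthsSet, l.all PySem.Chars.isdigit = true ∧ pvLenTokens.contains l = true := by decide
theorem pvLenTok_mem : ∀ l ∈ pvLenTokens, l ∈ pvLengthsSet := by decide
theorem pvPitch_facts : ∀ p ∈ pvPitchesSet, p ≠ [] := by decide
theorem pvPitch_head : ∀ p ∈ pvPitchesSet,
    p.head?.all (fun c => !PySem.Chars.isdigit c && pvPitchChars.contains c) = true ∧
    (p.tail = [] ∨ (p.tail = ['#'] ∧ p.head? ≠ some 'p')) := by decide
theorem pvPitchChar_mem : ∀ c ∈ pvPitchChars, [c] ∈ pvPitchesSet := by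
  intro c hc; fin_cases hc <;> decide
theorem pvPitchChar_sharp_mem : ∀ c ∈ pvPitchChars, c ≠ 'p' → [c, '#'] ∈ pvPitchesSet := by
  intro c hc; fin_cases hc <;> decide
theorem pvScaleChar_mem : ∀ c ∈ pvScaleChars, [c] ∈ pvScalesSet := by
  intro c hc; fin_cases hc <;> decide
theorem pvParseScale_parts : ∀ sc ∈ pvScalesSet, ∀ st ∈ pvStopsSet, pvParseScale (sc ++ st) = true := by decide
theorem pvScaleStop_head : ∀ sc ∈ pvScalesSet, ∀ st ∈ pvStopsSet, (sc ++ st).head? ≠ some '#' := by decide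

theorem spanDigits_append (cs : List Char) : (pvSpanDigits cs).1 ++ (pvSpanDigits cs).2 = cs := by
  induction cs with
  | nil => rfl
  | cons c t ih =>
    simp only [pvSpanDigits]
    split
    · simpa using ih
    · rfl

theorem spanDigits_concat (l r : List Char) (hl : l.all PySem.Chars.isdigit = true)
    (hr : ∀ c ∈ r.head?, PySem.Chars.isdigit c = false) :
    pvSpanDigits (l ++ r) = (l, r) := by
  induction l with
  | nil =>
    cases r with
    | nil => rfl
    | cons c t => simp [pvSpanDigits, hr c (by simp)]
  | cons c t ih =>
    simp only [List.all_cons, Bool.and_eq_true] at hl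
    simp [pvSpanDigits, hl.1, ih hl.2]

-- the stop step succeeds only on '' and '.'
theorem pvParseStop_decomp {r : List Char} (h : pvParseStop r = true) : r = [] ∨ r = ['.'] := by
  cases r with
  | nil => exact Or.inl rfl
  | cons c t =>
    simp only [pvParseStop] at h
    split at h
    · subst_vars; simp_all [List.isEmpty_iff]
    · exact absurd h (by simp)

-- the scale+stop steps succeed exactly on a scale token followed by a stop token
theorem pvParseScale_decomp {r : List Char} (h : pvParseScale r = true) :
    ∃ sc ∈ pvScalesSet, ∃ st ∈ pvStopsSet, r = sc ++ st := by
  cases r with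
  | nil => exact ⟨[], by decide, [], by decide, rfl⟩
  | cons c t =>
    simp only [pvParseScale] at h
    split_ifs at h with hcs
    · rcases pvParseStop_decomp h with rfl | rfl
      · exact ⟨[c], pvScaleChar_mem c (by simpa using hcs), [], by decide, rfl⟩
      · exact ⟨[c], pvScaleChar_mem c (by simpa using hcs), ['.'], by decide, rfl⟩
    · rcases pvParseStop_decomp h with h' | h'
      · exact absurd h' (by simp)
      · rw [h']; exact ⟨[], by decide, ['.'], by decide, rfl⟩

-- forward: a parsed note is a table entry
theorem mem_of_parse {cs : List Char} (h : pvParseNote cs = true) : cs ∈ pvNoteList := by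
  have hsplit := spanDigits_append cs
  rcases hsp : pvSpanDigits cs with ⟨d, r⟩
  rw [hsp] at hsplit
  simp only [] at hsplit
  rw [mem_pvNoteList_iff]
  cases r with
  | nil => simp [pvParseNote, hsp] at h
  | cons pitch r1 =>
    cases r1 with
    | nil =>
      simp only [pvParseNote, hsp] at h
      split_ifs at h with hd hp
      obtain ⟨sc, hsc, st, hst, hr⟩ := pvParseScale_decomp h
      refine ⟨d, pvLenTok_mem d (by simpa using hd), [pitch],
        pvPitchChar_mem pitch (by simpa using hp), sc, hsc, st, hst, ?_⟩
      rw [← hsplit]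
      simp at hr
      simp [hr]
    | cons c r2 =>
      simp only [pvParseNote, hsp] at h
      split_ifs at h with hd hp hc hpp
      · -- sharp consumed: pitch ≠ 'p', c = '#'
        simp only [Bool.not_eq_true', Bool.not_eq_false] at hd hp
        obtain ⟨sc, hsc, st, hst, hr⟩ := pvParseScale_decomp h
        subst hc
        refine ⟨d, pvLenTok_mem d (by simpa using hd), [pitch, '#'],
          pvPitchChar_sharp_mem pitch (by simpa using hp) hpp, sc, hsc, st, hst, ?_⟩
        rw [← hsplit, hr]
        simp
      · -- no sharp
        simp only [Bool.not_eq_true', Bool.not_eq_false] at hd hp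
        obtain ⟨sc, hsc, st, hst, hr⟩ := pvParseScale_decomp h
        refine ⟨d, pvLenTok_mem d (by simpa using hd), [pitch],
          pvPitchChar_mem pitch (by simpa using hp), sc, hsc, st, hst, ?_⟩
        rw [← hsplit, hr]
        simp

-- backward: every table entry parses
theorem parse_of_parts {l p sc st : List Char}
    (hl : l ∈ pvLengthsSet) (hp : p ∈ pvPitchesSet) (hsc : sc ∈ pvScalesSet) (hst : st ∈ pvStopsSet) :
    pvParseNote (l ++ p ++ sc ++ st) = true := by
  obtain ⟨c, t, rfl⟩ : ∃ c t, p = c :: t := by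
    cases hpe : p with
    | nil => exact absurd hpe (pvPitch_facts p hp)
    | cons c t => exact ⟨c, t, rfl⟩
  obtain ⟨hhead, hshape⟩ := pvPitch_head _ hp
  simp only [List.head?_cons, Option.all_some, Bool.and_eq_true, Bool.not_eq_true'] at hhead
  obtain ⟨hcd, hcp⟩ := hhead
  simp only [List.tail_cons, List.head?_cons] at hshape
  have hshape' : t = [] ∨ (t = ['#'] ∧ c ≠ 'p') := by
    rcases hshape with h1 | ⟨h1, h2⟩
    · exact Or.inl h1
    · exact Or.inr ⟨h1, fun he => h2 (by rw [he])⟩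
  have hld := pvLen_facts l hl
  have hscst := pvParseScale_parts sc hsc st hst
  have hspan : pvSpanDigits (l ++ (c :: (t ++ sc ++ st))) = (l, c :: (t ++ sc ++ st)) :=
    spanDigits_concat l _ hld.1 (by intro x hx; simp at hx; subst hx; exact hcd)
  have harr : l ++ c :: t ++ sc ++ st = l ++ (c :: (t ++ sc ++ st)) := by simp
  rw [harr]
  simp only [pvParseNote, hspan, hld.2, hcp, Bool.not_true, Bool.false_eq_true, if_false]
  rcases hshape' with rfl | ⟨rfl, hcnp⟩
  · -- no sharp in the pitch: next char (if any) is the head of sc ++ st, never '#'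
    simp only [List.nil_append]
    cases hss : sc ++ st with
    | nil => simpa [hss] using hscst
    | cons c2 t2 =>
      have hc2 : ¬ c2 = '#' := by
        have := pvScaleStop_head sc hsc st hst
        rw [hss] at this; simp at this; exact this
      simpa [hc2, hss] using hscst
  · -- sharp consumed
    simp only [List.cons_append, List.nil_append, hcnp, if_false]
    exact hscst

theorem contains_eq_parse (cs : List Char) : pvNoteList.contains cs = pvParseNote cs := by
  by_cases h : pvParseNote cs = true
  · rw [h, List.contains_eq_mem]; simpa using mem_of_parse h
  · rw [Bool.eq_false_iff.mpr h, List.contains_eq_mem]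
    simp only [decide_eq_false_iff_not]
    intro hmem
    obtain ⟨l, hl, p, hp, sc, hsc, st, hst, rfl⟩ := (mem_pvNoteList_iff cs).mp hmem
    exact h (parse_of_parts hl hp hsc hst)

theorem checkLoop_eq_all (l : List (List Char)) : pvCheckLoop l = l.all pvParseNote := by
  induction l with
  | nil => rfl
  | cons n rest ih =>
    simp only [pvCheckLoop, List.all_cons, ← contains_eq_parse, ih]
    cases hc : pvNoteList.contains n <;> simp

-- ===== VERDICT (by name: the statement is the Claim_ definition above) =====
theorem check_valid_note_spec : Claim_equal_check_valid_note := by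
  intro note_data _
  unfold Spec_check_valid_note check_valid_note check_valid_note_alt
  exact checkLoop_eq_all _
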